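-- pv_equiv track=rewrite | github.com/kanak8278/IBC-RAG | scripts/chunking_act.py | add_context_overlap
-- ===== SOURCE A (Python) =====
-- def add_context_overlap(chunks, overlap_size=100):
--     """Add controlled overlap between chunks"""
--     processed_chunks = []
--
--     for i in range(len(chunks)):
--         chunk = chunks[i]
--
--         # Add previous context
--         if i > 0:
--             prev_lines = chunks[i - 1]["content"].splitlines()
--             context_lines = []
--             size = 0
--             for line in reversed(prev_lines):
--                 if size + len(line) > overlap_size:
--                     break
--                 context_lines.insert(0, line)
--                 size += len(line)
--             if context_lines:
--                 chunk["previous_context"] = "\n".join(context_lines)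
--
--         # Add next context
--         if i < len(chunks) - 1:
--             next_lines = chunks[i + 1]["content"].splitlines()
--             context_lines = []
--             size = 0
--             for line in next_lines:
--                 if size + len(line) > overlap_size:
--                     break
--                 context_lines.append(line)
--                 size += len(line)
--             if context_lines:
--                 chunk["next_context"] = "\n".join(context_lines)
--
--         processed_chunks.append(chunk)
--
--     return processed_chunks
-- ===== SOURCE B (Python) =====
-- def _prefix_sums(lines):
--     sums = []
--     total = 0
--     for line in lines:
--         total += len(line)
--         sums.append(total)
--     return sums
--
--
-- def _count_within(sums, overlap_size):
--     # sums is nondecreasing (line lengths are >= 0), so binary search finds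
--     # the largest k with sums[k-1] <= overlap_size.
--     lo, hi = 0, len(sums)
--     while lo < hi:
--         mid = (lo + hi) // 2
--         if sums[mid] <= overlap_size:
--             lo = mid + 1
--         else:
--             hi = mid
--     return lo
--
--
-- def add_context_overlap(chunks, overlap_size=100):
--     """Staged version: precompute every chunk's line list and its length
--     prefix-sums (forward and reversed), then pick each overlap window by
--     binary search over the prefix sums and a single slice."""
--     n = len(chunks)
--     if n >= 2:
--         lines_list = [c["content"].splitlines() for c in chunks]
--         fwd = [_prefix_sums(ls) for ls in lines_list]
--         rev = [_prefix_sums(ls[::-1]) for ls in lines_list]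
--         for i, chunk in enumerate(chunks):
--             if i > 0:
--                 k = _count_within(rev[i - 1], overlap_size)
--                 if k:
--                     ls = lines_list[i - 1]
--                     chunk["previous_context"] = "\n".join(ls[len(ls) - k:])
--             if i < n - 1:
--                 k = _count_within(fwd[i + 1], overlap_size)
--                 if k:
--                     chunk["next_context"] = "\n".join(lines_list[i + 1][:k])
--     return chunks
-- ===== Notes on version B (the rewrite author's own statement) =====
-- stated objective: alternative
-- what changed: Replaced A's per-neighbor greedy accumulate-until-break loops by a staged algorithm: precompute each chunk's line list and its length prefix-sums (forward and reversed) once, then select every overlap window by binary search over the monotone prefix sums plus one slice.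
import Mathlib
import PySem

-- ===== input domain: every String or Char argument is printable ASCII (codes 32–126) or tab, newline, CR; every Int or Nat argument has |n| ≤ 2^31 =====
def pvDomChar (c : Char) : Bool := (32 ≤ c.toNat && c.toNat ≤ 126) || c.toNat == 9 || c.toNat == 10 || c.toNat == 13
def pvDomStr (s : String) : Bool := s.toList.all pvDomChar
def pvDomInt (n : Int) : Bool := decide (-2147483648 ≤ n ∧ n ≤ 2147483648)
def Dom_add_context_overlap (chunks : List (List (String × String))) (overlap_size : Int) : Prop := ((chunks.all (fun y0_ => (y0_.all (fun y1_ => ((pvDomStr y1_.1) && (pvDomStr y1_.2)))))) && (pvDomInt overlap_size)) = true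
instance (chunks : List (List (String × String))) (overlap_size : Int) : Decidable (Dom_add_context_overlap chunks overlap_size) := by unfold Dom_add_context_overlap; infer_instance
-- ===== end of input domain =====

-- B replaces A's greedy accumulate-until-break neighbor loops by staged precomputation: line lists
-- and length prefix-sums per chunk, with each overlap window chosen by binary search plus one slice.
-- Both Pythons mutate the chunk dicts in place and return the same list; equivalence is about the
-- returned value (each Python dict is represented canonically via PySem.Dict.mk).

-- ===== PORT A =====
-- the `for line in reversed(prev_lines)` loop with context_lines.insert(0, line)
def aPrevLoop (overlap_size : Int) : List String → List String → Int → List String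
  | [], acc, _ => acc
  | l :: rest, acc, size =>
    if size + PySem.Str.len l > overlap_size then acc
    else aPrevLoop overlap_size rest (l :: acc) (size + PySem.Str.len l)

-- the `for line in next_lines` loop with context_lines.append(line)
def aNextLoop (overlap_size : Int) : List String → List String → Int → List String
  | [], acc, _ => acc
  | l :: rest, acc, size =>
    if size + PySem.Str.len l > overlap_size then acc
    else aNextLoop overlap_size rest (acc ++ [l]) (size + PySem.Str.len l)

def add_context_overlap (chunks : List (List (String × String))) (overlap_size : Int) : List (List (String × String)) :=
  (PySem.List.pyRange 0 (chunks.length : Int) 1).foldl (fun processed_chunks i =>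
    let chunk := PySem.Dict.mk ((PySem.List.pyGet? chunks i).getD [])
    let chunk :=
      if i > 0 then
        let prev_lines := PySem.Str.splitlines
          (((PySem.Dict.mk ((PySem.List.pyGet? chunks (i - 1)).getD [])).get? "content").getD "")
        let context_lines := aPrevLoop overlap_size prev_lines.reverse [] 0
        if context_lines ≠ [] then chunk.insert "previous_context" (PySem.Str.join "\n" context_lines)
        else chunk
      else chunk
    let chunk :=
      if i < (chunks.length : Int) - 1 then
        let next_lines := PySem.Str.splitlines
          (((PySem.Dict.mk ((PySem.List.pyGet? chunks (i + 1)).getD [])).get? "content").getD "")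
        let context_lines := aNextLoop overlap_size next_lines [] 0
        if context_lines ≠ [] then chunk.insert "next_context" (PySem.Str.join "\n" context_lines)
        else chunk
      else chunk
    processed_chunks ++ [chunk.items]) []

-- ===== PORT B =====
-- _prefix_sums: running totals of line lengths
def bPrefixSums (total : Int) : List String → List Int
  | [] => []
  | l :: rest => (total + PySem.Str.len l) :: bPrefixSums (total + PySem.Str.len l) rest

-- _count_within: the hand-written binary-search while loop (lo, hi are list positions, hence Nat;
-- sums[mid] is in range by the loop invariant, read with getD)
def bSearchLoop (sums : List Int) (overlap_size : Int) (lo hi : Nat) : Nat :=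
  if lo < hi then
    let mid := (lo + hi) / 2
    if sums.getD mid 0 ≤ overlap_size then bSearchLoop sums overlap_size (mid + 1) hi
    else bSearchLoop sums overlap_size lo mid
  else lo
  termination_by hi - lo
  decreasing_by all_goals omega

def bCountWithin (sums : List Int) (overlap_size : Int) : Nat :=
  bSearchLoop sums overlap_size 0 sums.length

def add_context_overlap_alt (chunks : List (List (String × String))) (overlap_size : Int) : List (List (String × String)) :=
  let n := chunks.length
  if 2 ≤ n then
    let lines_list := chunks.map (fun c =>
      PySem.Str.splitlines (((PySem.Dict.mk c).get? "content").getD ""))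
    let fwd := lines_list.map (fun ls => bPrefixSums 0 ls)
    -- ls[::-1] is List.reverse (PySem.List.slice?_none_none_neg_one)
    let rev := lines_list.map (fun ls => bPrefixSums 0 ls.reverse)
    (PySem.List.enumerate chunks 0).map (fun p =>
      let chunk := PySem.Dict.mk p.2
      let chunk :=
        if p.1 > 0 then
          let k := bCountWithin (PySem.List.pyGetD rev (p.1 - 1) []) overlap_size
          if k ≠ 0 then
            let ls := PySem.List.pyGetD lines_list (p.1 - 1) []
            chunk.insert "previous_context" (PySem.Str.join "\n" (ls.drop (ls.length - k)))
          else chunk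
        else chunk
      let chunk :=
        if p.1 < (n : Int) - 1 then
          let k := bCountWithin (PySem.List.pyGetD fwd (p.1 + 1) []) overlap_size
          if k ≠ 0 then
            chunk.insert "next_context" (PySem.Str.join "\n" ((PySem.List.pyGetD lines_list (p.1 + 1) []).take k))
          else chunk
        else chunk
      chunk.items)
  else chunks.map (fun c => (PySem.Dict.mk c).items)

-- ===== PRECONDITION & SPEC =====
-- Pre_ excludes exactly the inputs where Python A raises KeyError: with at least two chunks every
-- chunk's "content" is read (each chunk is some neighbor's), so it must be present in each chunk.
def Pre_add_context_overlap (chunks : List (List (String × String))) (overlap_size : Int) : Prop :=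
  chunks.length ≤ 1 ∨ ∀ c ∈ chunks, ((PySem.Dict.mk c).get? "content").isSome
instance (chunks : List (List (String × String))) (overlap_size : Int) : Decidable (Pre_add_context_overlap chunks overlap_size) := by unfold Pre_add_context_overlap; infer_instance

def pvWitness_add_context_overlap : (List (List (String × String))) × Int :=
  ([[("content", "ab\ncd"), ("x", "y")], [("content", "e")]], 3)

def Spec_add_context_overlap (chunks : List (List (String × String))) (overlap_size : Int) (out : List (List (String × String))) : Prop := out = add_context_overlap_alt chunks overlap_size
instance (chunks : List (List (String × String))) (overlap_size : Int) (out : List (List (String × String))) : Decidable (Spec_add_context_overlap chunks overlap_size out) := by unfold Spec_add_context_overlap; infer_instance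

-- ===== CLAIM (what is proved, stated in full; the proofs are below) =====
def Claim_equal_add_context_overlap : Prop := ∀ (chunks : List (List (String × String))) (overlap_size : Int), Dom_add_context_overlap chunks overlap_size → Pre_add_context_overlap chunks overlap_size → Spec_add_context_overlap chunks overlap_size (add_context_overlap chunks overlap_size)

-- ===== LEMMAS AND PROOFS =====

-- every entry of a running-totals list is at least the starting total
theorem le_of_bPrefixSums_mem : ∀ (lines : List String) (t : Int) (x : Int),
    x ∈ bPrefixSums t lines → t ≤ x := by
  intro lines
  induction lines with
  | nil => intro t x hx; simp [bPrefixSums] at hx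
  | cons l rest ih =>
    intro t x hx
    simp only [bPrefixSums, List.mem_cons] at hx
    have hl : 0 ≤ PySem.Str.len l := by simp [PySem.Str.len]
    rcases hx with h | h
    · omega
    · have := ih _ _ h; omega

-- what A's greedy loops compute, as a structural take
def gTake (ov : Int) (size : Int) : List String → List String
  | [] => []
  | l :: rest =>
    if size + PySem.Str.len l > ov then []
    else l :: gTake ov (size + PySem.Str.len l) rest

-- number of leading prefix sums ≤ ov (what the binary search must return)
def cntLE (ov : Int) : List Int → Nat
  | [] => 0
  | s :: rest => if s ≤ ov then cntLE ov rest + 1 else 0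

theorem aNextLoop_eq (ov : Int) : ∀ (lines acc : List String) (size : Int),
    aNextLoop ov lines acc size = acc ++ gTake ov size lines := by
  intro lines
  induction lines with
  | nil => intro acc size; simp [aNextLoop, gTake]
  | cons l rest ih =>
    intro acc size
    simp only [aNextLoop, gTake]
    split
    · simp
    · rw [ih]; simp

theorem aPrevLoop_eq (ov : Int) : ∀ (lines acc : List String) (size : Int),
    aPrevLoop ov lines acc size = (gTake ov size lines).reverse ++ acc := by
  intro lines
  induction lines with
  | nil => intro acc size; simp [aPrevLoop, gTake]
  | cons l rest ih =>
    intro acc size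
    simp only [aPrevLoop, gTake]
    split
    · simp
    · rw [ih]; simp

theorem gTake_eq_take (ov : Int) : ∀ (lines : List String) (size : Int),
    gTake ov size lines = lines.take (cntLE ov (bPrefixSums size lines)) := by
  intro lines
  induction lines with
  | nil => intro size; simp [gTake, bPrefixSums]
  | cons l rest ih =>
    intro size
    simp only [gTake, bPrefixSums, cntLE]
    by_cases h : size + PySem.Str.len l ≤ ov
    · rw [if_neg (by omega), if_pos h, ih]
      simp
    · rw [if_pos (by omega), if_neg h]
      simp

theorem cntLE_le_length (ov : Int) : ∀ sums : List Int, cntLE ov sums ≤ sums.length := by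
  intro sums
  induction sums with
  | nil => simp [cntLE]
  | cons s rest ih =>
    simp only [cntLE, List.length_cons]
    split <;> omega

theorem cntLE_lt_imp (ov : Int) : ∀ (sums : List Int) (j : Nat), j < cntLE ov sums →
    sums.getD j 0 ≤ ov := by
  intro sums
  induction sums with
  | nil => simp [cntLE]
  | cons s rest ih =>
    intro j hj
    simp only [cntLE] at hj
    by_cases hs : s ≤ ov
    · rw [if_pos hs] at hj
      cases j with
      | zero => simpa using hs
      | succ j' => simpa using ih j' (by omega)
    · rw [if_neg hs] at hj; omega

theorem cntLE_ge_imp (ov : Int) : ∀ sums : List Int, sums.Pairwise (· ≤ ·) →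
    cntLE ov sums < sums.length → ov < sums.getD (cntLE ov sums) 0 := by
  intro sums
  induction sums with
  | nil => simp
  | cons s rest ih =>
    intro hpw hlen
    by_cases hs : s ≤ ov
    · have hc : cntLE ov (s :: rest) = cntLE ov rest + 1 := by simp [cntLE, hs]
      rw [hc] at hlen ⊢
      simp only [List.length_cons] at hlen
      simpa using ih hpw.tail (by omega)
    · have hc : cntLE ov (s :: rest) = 0 := by simp [cntLE, hs]
      rw [hc]
      simpa using by omega

theorem bPrefixSums_pairwise : ∀ (lines : List String) (t : Int),
    (bPrefixSums t lines).Pairwise (· ≤ ·) := by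
  intro lines
  induction lines with
  | nil => intro t; simp [bPrefixSums]
  | cons l rest ih =>
    intro t
    simp only [bPrefixSums, List.pairwise_cons]
    exact ⟨fun x hx => le_of_bPrefixSums_mem rest _ x hx, ih _⟩

theorem length_bPrefixSums : ∀ (lines : List String) (t : Int),
    (bPrefixSums t lines).length = lines.length := by
  intro lines
  induction lines with
  | nil => intro t; simp [bPrefixSums]
  | cons l rest ih => intro t; simp [bPrefixSums, ih]

theorem pairwise_getD_mono (sums : List Int) (h : sums.Pairwise (· ≤ ·)) (i j : Nat)
    (hij : i ≤ j) (hj : j < sums.length) : sums.getD i 0 ≤ sums.getD j 0 := by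
  rcases Nat.eq_or_lt_of_le hij with rfl | hlt
  · exact le_refl _
  · rw [List.getD_eq_getElem _ _ (by omega), List.getD_eq_getElem _ _ hj]
    exact List.pairwise_iff_getElem.mp h i j (by omega) hj hlt

theorem bSearchLoop_eq_fuel (sums : List Int) (ov : Int) (hmono : sums.Pairwise (· ≤ ·)) :
    ∀ (d lo hi : Nat), hi - lo ≤ d → lo ≤ hi → hi ≤ sums.length → lo ≤ cntLE ov sums →
    cntLE ov sums ≤ hi → bSearchLoop sums ov lo hi = cntLE ov sums := by
  intro d
  induction d with
  | zero =>
    intro lo hi hd h1 h2 h3 h4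
    rw [bSearchLoop]
    rw [if_neg (by omega)]
    omega
  | succ d ih =>
    intro lo hi hd h1 h2 h3 h4
    rw [bSearchLoop]
    by_cases hlh : lo < hi
    · rw [if_pos hlh]
      have hmid1 : lo ≤ (lo + hi) / 2 := by omega
      have hmid2 : (lo + hi) / 2 < hi := by omega
      by_cases hle : sums.getD ((lo + hi) / 2) 0 ≤ ov
      · rw [if_pos hle]
        have hmlt : (lo + hi) / 2 < cntLE ov sums := by
          by_contra hc
          have hT : cntLE ov sums < sums.length := by omega
          have := pairwise_getD_mono sums hmono (cntLE ov sums) ((lo + hi) / 2)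
            (by omega) (by omega)
          have := cntLE_ge_imp ov sums hmono hT
          omega
        exact ih ((lo + hi) / 2 + 1) hi (by omega) (by omega) h2 (by omega) h4
      · rw [if_neg hle]
        have hmge : cntLE ov sums ≤ (lo + hi) / 2 := by
          by_contra hc
          exact hle (cntLE_lt_imp ov sums ((lo + hi) / 2) (by omega))
        exact ih lo ((lo + hi) / 2) (by omega) (by omega) (by omega) h3 hmge
    · rw [if_neg hlh]
      omega

theorem bSearchLoop_eq (sums : List Int) (ov : Int) (hmono : sums.Pairwise (· ≤ ·)) :
    ∀ (lo hi : Nat), lo ≤ hi → hi ≤ sums.length → lo ≤ cntLE ov sums → cntLE ov sums ≤ hi →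
    bSearchLoop sums ov lo hi = cntLE ov sums := by
  intro lo hi
  exact bSearchLoop_eq_fuel sums ov hmono (hi - lo) lo hi (le_refl _)

theorem bCountWithin_eq (lines : List String) (ov : Int) :
    bCountWithin (bPrefixSums 0 lines) ov = cntLE ov (bPrefixSums 0 lines) := by
  exact bSearchLoop_eq _ ov (bPrefixSums_pairwise lines 0) 0 _ (Nat.zero_le _) (le_refl _)
    (Nat.zero_le _) (cntLE_le_length ov _)

-- A's next-context loop is a take of the binary-search count
theorem aNext_eq_take (ov : Int) (ls : List String) :
    aNextLoop ov ls [] 0 = ls.take (bCountWithin (bPrefixSums 0 ls) ov) := by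
  rw [aNextLoop_eq, gTake_eq_take, bCountWithin_eq]
  simp

theorem aNext_nil_iff (ov : Int) (ls : List String) :
    aNextLoop ov ls [] 0 = [] ↔ bCountWithin (bPrefixSums 0 ls) ov = 0 := by
  rw [aNext_eq_take, List.take_eq_nil_iff]
  have h1 := cntLE_le_length ov (bPrefixSums 0 ls)
  have h2 := length_bPrefixSums ls 0
  rw [bCountWithin_eq]
  constructor
  · rintro (h | h)
    · exact h
    · subst h; simp [bPrefixSums, cntLE]
  · exact fun h => Or.inl h

-- A's previous-context loop is a drop of the binary-search count on the reversed lines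
theorem aPrev_eq_drop (ov : Int) (ls : List String) :
    aPrevLoop ov ls.reverse [] 0
      = ls.drop (ls.length - bCountWithin (bPrefixSums 0 ls.reverse) ov) := by
  rw [aPrevLoop_eq, gTake_eq_take, bCountWithin_eq, List.append_nil]
  rw [List.take_reverse, List.reverse_reverse]

theorem aPrev_nil_iff (ov : Int) (ls : List String) :
    aPrevLoop ov ls.reverse [] 0 = [] ↔ bCountWithin (bPrefixSums 0 ls.reverse) ov = 0 := by
  rw [aPrev_eq_drop, List.drop_eq_nil_iff]
  have h1 := cntLE_le_length ov (bPrefixSums 0 ls.reverse)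
  have h2 := length_bPrefixSums ls.reverse 0
  rw [bCountWithin_eq]
  simp at h2
  omega

-- mapping over enumerate is mapping over range
theorem map_enumerate_eq {α β : Type} (f : Int × α → β) (d : α) :
    ∀ (xs : List α) (s : Int),
    (PySem.List.enumerate xs s).map f
      = (List.range xs.length).map (fun (k : Nat) => f (s + (k : Int), xs.getD k d)) := by
  intro xs
  induction xs with
  | nil => intro s; simp [PySem.List.enumerate]
  | cons x xs ih =>
    intro s
    rw [PySem.List.enumerate_cons, List.length_cons, List.range_succ_eq_map]
    simp only [List.map_cons, List.map_map]
    rw [ih (s + 1)]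
    congr 1
    · norm_num
    · apply List.map_congr_left
      intro k _
      simp only [Function.comp_apply, List.getD_cons_succ]
      congr 2
      push_cast
      ring

-- A's guarded previous-context insertion equals B's count-guarded drop insertion
theorem prevIf_eq (ov : Int) (ls : List String) (d : PySem.Dict String String) :
    (if aPrevLoop ov ls.reverse [] 0 ≠ [] then
        d.insert "previous_context" (PySem.Str.join "
" (aPrevLoop ov ls.reverse [] 0))
      else d)
    = (if bCountWithin (bPrefixSums 0 ls.reverse) ov ≠ 0 then
        d.insert "previous_context" (PySem.Str.join "
"
          (ls.drop (ls.length - bCountWithin (bPrefixSums 0 ls.reverse) ov)))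
      else d) := by
  by_cases h : bCountWithin (bPrefixSums 0 ls.reverse) ov = 0
  · rw [if_neg (by simp [aPrev_nil_iff, h]), if_neg (by simp [h])]
  · rw [if_pos (by simp [aPrev_nil_iff, h]), if_pos h, aPrev_eq_drop]

-- A's guarded next-context insertion equals B's count-guarded take insertion
theorem nextIf_eq (ov : Int) (ls : List String) (d : PySem.Dict String String) :
    (if aNextLoop ov ls [] 0 ≠ [] then
        d.insert "next_context" (PySem.Str.join "
" (aNextLoop ov ls [] 0))
      else d)
    = (if bCountWithin (bPrefixSums 0 ls) ov ≠ 0 then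
        d.insert "next_context" (PySem.Str.join "
"
          (ls.take (bCountWithin (bPrefixSums 0 ls) ov)))
      else d) := by
  by_cases h : bCountWithin (bPrefixSums 0 ls) ov = 0
  · rw [if_neg (by simp [aNext_nil_iff, h]), if_neg (by simp [h])]
  · rw [if_pos (by simp [aNext_nil_iff, h]), if_pos h, aNext_eq_take]

-- ===== VERDICT (by name: the statement is the Claim_ definition above) =====
theorem add_context_overlap_spec : Claim_equal_add_context_overlap := by
  intro chunks ov hdom hpre
  unfold Spec_add_context_overlap
  clear hdom hpre
  by_cases hn : 2 ≤ chunks.length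
  · unfold add_context_overlap add_context_overlap_alt
    rw [if_pos hn]
    rw [PySem.List.foldl_append_singleton_eq_map]
    rw [map_enumerate_eq _ ([] : List (String × String))]
    rw [PySem.List.pyRange_one]
    simp only [Int.sub_zero, Int.toNat_natCast, List.map_map, List.nil_append]
    apply List.map_congr_left
    intro k hk
    rw [List.mem_range] at hk
    simp only [Function.comp_apply, zero_add, gt_iff_lt]
    have hGk : (PySem.List.pyGet? chunks ((k : Nat) : Int)).getD [] = chunks[k] := by
      simp [pysem, hk]
    have hgetD : chunks.getD k [] = chunks[k] := List.getD_eq_getElem chunks [] hk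
    have hmap : ∀ {β : Type} (F : List (String × String) → β) (d : β) (j : Nat)
        (hj : j < chunks.length),
        PySem.List.pyGetD (List.map F chunks) ((j : Nat) : Int) d = F (chunks[j]'hj) := by
      intro β F d j hj
      rw [PySem.List.pyGetD_natCast, List.getD_eq_getElem _ _ (by simpa using hj),
        List.getElem_map]
    have hA : ∀ (j : Nat) (hj : j < chunks.length),
        (PySem.List.pyGet? chunks ((j : Nat) : Int)).getD [] = chunks[j]'hj := by
      intro j hj
      simp [pysem, hj]
    rw [hGk, hgetD]
    by_cases hnext : (k : Int) < (chunks.length : Int) - 1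
    · rw [if_pos hnext, if_pos hnext]
      by_cases hprev : (0 : Int) < (k : Int)
      · rw [if_pos hprev, if_pos hprev]
        have e1 : (k : Int) - 1 = ((k - 1 : Nat) : Int) := by omega
        have e2 : (k : Int) + 1 = ((k + 1 : Nat) : Int) := by push_cast; ring
        have hj1 : k - 1 < chunks.length := by omega
        have hj2 : k + 1 < chunks.length := by omega
        rw [e1, e2, hA _ hj1, hA _ hj2]
        simp only [hmap _ _ _ hj1, hmap _ _ _ hj2]
        simp only [Function.comp_apply]
        rw [prevIf_eq, nextIf_eq]
      · rw [if_neg hprev, if_neg hprev]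
        have e2 : (k : Int) + 1 = ((k + 1 : Nat) : Int) := by push_cast; ring
        have hj2 : k + 1 < chunks.length := by omega
        rw [e2, hA _ hj2]
        simp only [hmap _ _ _ hj2]
        simp only [Function.comp_apply]
        rw [nextIf_eq]
    · rw [if_neg hnext, if_neg hnext]
      have hprev : (0 : Int) < (k : Int) := by
        have : k = chunks.length - 1 := by omega
        omega
      rw [if_pos hprev, if_pos hprev]
      have e1 : (k : Int) - 1 = ((k - 1 : Nat) : Int) := by omega
      have hj1 : k - 1 < chunks.length := by omega
      rw [e1, hA _ hj1]
      simp only [hmap _ _ _ hj1]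
      simp only [Function.comp_apply]
      rw [prevIf_eq]
  · rcases chunks with _ | ⟨c, _ | ⟨c2, rest⟩⟩
    · rfl
    · unfold add_context_overlap add_context_overlap_alt
      norm_num [PySem.List.pyRange_one, List.range_succ]
    · exact absurd (by simp) hn
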